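-- pv_equiv track=rewrite | github.com/pelavarre/byobash | bin/byotools.py | shlex_parms_partition
-- ===== SOURCE A (Python) =====
-- def shlex_parms_partition(parms, mark=None):
--     """Split Options from Positional Args, in the classic way of ArgParse and Sh"""
--
--     options = list()
--     seps = list()
--     words = list()
--
--     for (index, parm) in enumerate(parms):
--
--         # Pick out the First Sep
--         # and take the remaining Parms as Positional Args, not as Options
--
--         if parm == "--":
--             seps.append(parm)
--
--         # Pick out each Option, before the First Sep
--
--         elif not seps:
--             if (parm != "-") and parm.startswith("-") and not parm.startswith("---"):
--                 options.append(parm)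
--
--             # Pick out each Arg before the First Sep
--
--             elif mark is not None:
--                 marked = mark + parm
--                 options.append(marked)
--             else:
--                 words.append(parm)
--
--         # Pick out each Arg after the First Sep
--
--         else:
--             words.append(parm)
--
--     return (options, seps, words)
-- ===== SOURCE B (Python) =====
-- def shlex_parms_partition(parms, mark=None):
--     """Split Options from Positional Args, in the classic way of ArgParse and Sh"""
--
--     # Split at the first "--" (or at the end when there is none)
--
--     try:
--         i = parms.index("--")
--     except ValueError:
--         i = len(parms)
--     head = parms[:i]
--     tail = parms[i:]
--
--     # Before the first Sep: classify as Option, marked Arg, or plain Word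
--
--     options = []
--     words = []
--     for parm in head:
--         if (parm != "-") and parm.startswith("-") and not parm.startswith("---"):
--             options.append(parm)
--         elif mark is not None:
--             options.append(mark + parm)
--         else:
--             words.append(parm)
--
--     # From the first Sep on: every "--" is a Sep, everything else a Word
--
--     seps = [parm for parm in tail if parm == "--"]
--     words += [parm for parm in tail if parm != "--"]
--
--     return (options, seps, words)
-- ===== Notes on version B (the rewrite author's own statement) =====
-- stated objective: alternative
-- what changed: B replaces A's single stateful loop (whose behaviour depends on whether seps is already nonempty) by a split at the first "--": one stateless pass classifies the head into options/marked-args/words, and two filters over the tail collect the seps and the remaining words.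
import Mathlib
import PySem

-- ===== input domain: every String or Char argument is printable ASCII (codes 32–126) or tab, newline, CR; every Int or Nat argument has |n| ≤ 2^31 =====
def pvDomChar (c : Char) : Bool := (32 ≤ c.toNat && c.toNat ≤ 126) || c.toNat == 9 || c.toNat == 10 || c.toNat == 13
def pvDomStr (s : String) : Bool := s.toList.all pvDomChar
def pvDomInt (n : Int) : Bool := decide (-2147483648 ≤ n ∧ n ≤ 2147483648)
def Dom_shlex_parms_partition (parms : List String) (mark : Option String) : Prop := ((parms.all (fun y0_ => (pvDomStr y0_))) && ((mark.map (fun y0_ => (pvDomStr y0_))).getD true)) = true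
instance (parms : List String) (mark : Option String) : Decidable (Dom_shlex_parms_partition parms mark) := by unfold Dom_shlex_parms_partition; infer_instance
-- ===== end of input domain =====

-- B replaces A's single stateful loop (branching on whether seps is already nonempty) by a
-- split at the first "--" with a stateless head pass and two tail filters; same O(n) cost.

-- ===== PORT A =====
-- Loop body of A's single for-loop (the enumerate index is unused by A's code).
def shlexStepA (mark : Option String) :
    (List String × List String × List String) → String → (List String × List String × List String)
  | (options, seps, words), parm =>
    if parm == "--" then
      (options, seps ++ [parm], words)
    else if seps.isEmpty then
      (if (parm != "-") && PySem.Str.startswith parm "-" && !(PySem.Str.startswith parm "---") then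
        (options ++ [parm], seps, words)
      else
        match mark with
        | some m => (options ++ [m ++ parm], seps, words)
        | none => (options, seps, words ++ [parm]))
    else
      (options, seps, words ++ [parm])

def shlex_parms_partition (parms : List String) (mark : Option String) :
    List String × List String × List String :=
  parms.foldl (shlexStepA mark) ([], [], [])

-- ===== PORT B =====
-- Loop body of B's head pass (before the first "--").
def shlexStepB (mark : Option String) :
    (List String × List String) → String → (List String × List String)
  | (options, words), parm =>
    if (parm != "-") && PySem.Str.startswith parm "-" && !(PySem.Str.startswith parm "---") then
      (options ++ [parm], words)
    else
      match mark with
      | some m => (options ++ [m ++ parm], words)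
      | none => (options, words ++ [parm])

def shlex_parms_partition_alt (parms : List String) (mark : Option String) :
    List String × List String × List String :=
  -- i = parms.index("--"), or len(parms) when ValueError
  let i : Nat :=
    match PySem.List.index? parms "--" with
    | some i => i
    | none => parms.length
  let head := PySem.List.slice parms none (some (i : Int))   -- parms[:i]
  let tail := PySem.List.slice parms (some (i : Int)) none   -- parms[i:]
  let ow := head.foldl (shlexStepB mark) ([], [])
  let seps := tail.filter (fun parm => parm == "--")
  let words := ow.2 ++ tail.filter (fun parm => parm != "--")
  (ow.1, seps, words)

-- ===== PRECONDITION & SPEC =====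
def Spec_shlex_parms_partition (parms : List String) (mark : Option String) (out : List String × List String × List String) : Prop := out = shlex_parms_partition_alt parms mark
instance (parms : List String) (mark : Option String) (out : List String × List String × List String) : Decidable (Spec_shlex_parms_partition parms mark out) := by unfold Spec_shlex_parms_partition; infer_instance

-- ===== CLAIM =====
def Claim_equal_shlex_parms_partition : Prop := ∀ (parms : List String) (mark : Option String), Dom_shlex_parms_partition parms mark → Spec_shlex_parms_partition parms mark (shlex_parms_partition parms mark)

-- ===== LEMMAS AND PROOFS =====

-- Head phase: while no "--" has been seen, A's loop body acts exactly like B's head pass.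
theorem foldA_no_sep (mark : Option String) (l : List String) (h : "--" ∉ l) :
    ∀ (o w : List String),
      l.foldl (shlexStepA mark) (o, [], w) =
        ((l.foldl (shlexStepB mark) (o, w)).1, [], (l.foldl (shlexStepB mark) (o, w)).2) := by
  induction l with
  | nil => intro o w; simp
  | cons x l ih =>
    intro o w
    have hx : x ≠ "--" := fun hx => h (by simp [hx])
    have hl : "--" ∉ l := fun hm => h (by simp [hm])
    simp only [List.foldl_cons, shlexStepA, shlexStepB, beq_iff_eq, if_neg hx, List.isEmpty_nil,
      if_true]
    by_cases hc : (x != "-" && PySem.Str.startswith x "-" && !PySem.Str.startswith x "---") = true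
    · rw [if_pos hc, if_pos hc]; exact ih hl _ _
    · rw [if_neg hc, if_neg hc]
      cases mark with
      | none => exact ih hl _ _
      | some m => exact ih hl _ _

-- Tail phase: once seps is nonempty, A routes every "--" to seps and everything else to words.
theorem foldA_after_sep (mark : Option String) (l : List String) :
    ∀ (o s w : List String), s ≠ [] →
      l.foldl (shlexStepA mark) (o, s, w) =
        (o, s ++ l.filter (fun parm => parm == "--"), w ++ l.filter (fun parm => parm != "--")) := by
  induction l with
  | nil => intro o s w _; simp
  | cons x l ih =>
    intro o s w hs
    by_cases hx : x = "--"
    · subst hx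
      simp only [List.foldl_cons, shlexStepA]
      rw [if_pos (by simp : ("--" == "--") = true), ih o (s ++ ["--"]) w (by simp)]
      simp
    · have hne : (x == "--") = false := by simp [hx]
      have hse : s.isEmpty = false := by simp [hs]
      simp only [List.foldl_cons, shlexStepA, hne, Bool.false_eq_true, if_false, hse]
      rw [ih o s (w ++ [x]) hs]
      simp [hne, hx]

theorem shlex_parms_main (parms : List String) (mark : Option String) :
    shlex_parms_partition parms mark = shlex_parms_partition_alt parms mark := by
  unfold shlex_parms_partition shlex_parms_partition_alt
  cases hidx : PySem.List.index? parms "--" with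
  | none =>
    have hmem : "--" ∉ parms := (PySem.List.index?_eq_none_iff _ _).mp hidx
    simp only [PySem.List.slice_to_natCast, PySem.List.slice_from_natCast, List.take_length,
      List.drop_length]
    rw [foldA_no_sep mark parms hmem]
    simp
  | some i =>
    obtain ⟨pre, suf, hps, hlen, hpre⟩ := (PySem.List.index?_eq_some_iff _ _ _).mp hidx
    subst hps
    have htake : (pre ++ "--" :: suf).take i = pre := by
      subst hlen; simp
    have hdrop : (pre ++ "--" :: suf).drop i = "--" :: suf := by
      subst hlen; simp
    simp only [PySem.List.slice_to_natCast, PySem.List.slice_from_natCast, htake, hdrop]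
    rw [List.foldl_append, foldA_no_sep mark pre hpre]
    simp only [List.foldl_cons, shlexStepA]
    rw [if_pos (by simp : ("--" == "--") = true), foldA_after_sep mark suf _ _ _ (by simp)]
    simp

-- ===== VERDICT =====
theorem shlex_parms_partition_spec : Claim_equal_shlex_parms_partition := by
  intro parms mark _
  exact shlex_parms_main parms mark
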